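-- pv_equiv track=rewrite | github.com/sophiayk20/covoswitch | intonation_unit/replace_IU.py | nonconsecutive_combinations
-- ===== SOURCE A (Python) =====
-- from itertools import combinations
--
-- def nonconsecutive_combinations(iterable, r):
--     """
--         Given a list of intonation units, gives a combination of nonconsecutive indices to replace.
--
--         Args:
--             iterable (List(int)): list of intonation units
--             r (int): number of intonation units to replace (r == 1 means we are replacing 1 intonation unit)
--
--         Returns:
--             list of combinations to replace (List(int))
--     """
--     if not iterable:
--         return
--
--     if r == 1:
--         for item in iterable:
--             yield (item,)
--         return
--
--     for combination in combinations(iterable, r):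
--         if all(combination[i+1] - combination[i] != 1 for i in range(len(combination)-1)):
--             yield combination
-- ===== SOURCE B (Python) =====
-- def nonconsecutive_combinations(iterable, r):
--     """Pruned DFS: extend a partial pick only with values not equal to the
--     previous pick + 1, so invalid combinations are never materialised."""
--     if not iterable:
--         return
--     n = len(iterable)
--
--     def dfs(start, prev, k):
--         if k == 0:
--             yield ()
--             return
--         for i in range(start, n):
--             v = iterable[i]
--             if prev is None or v - prev != 1:
--                 for tail in dfs(i + 1, v, k - 1):
--                     yield (v,) + tail
--
--     yield from dfs(0, None, r)
-- ===== Notes on version B (the rewrite author's own statement) =====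
-- stated objective: alternative
-- what changed: Replaces generate-all-C(n,r)-combinations-then-filter with a pruned DFS that never extends a partial pick by a value equal to the previous pick + 1, so invalid combinations are never built.
-- outside the precondition, e.g. on nonconsecutive_combinations([1, 2], -1): A raises ValueError, B returns []
import Mathlib
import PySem

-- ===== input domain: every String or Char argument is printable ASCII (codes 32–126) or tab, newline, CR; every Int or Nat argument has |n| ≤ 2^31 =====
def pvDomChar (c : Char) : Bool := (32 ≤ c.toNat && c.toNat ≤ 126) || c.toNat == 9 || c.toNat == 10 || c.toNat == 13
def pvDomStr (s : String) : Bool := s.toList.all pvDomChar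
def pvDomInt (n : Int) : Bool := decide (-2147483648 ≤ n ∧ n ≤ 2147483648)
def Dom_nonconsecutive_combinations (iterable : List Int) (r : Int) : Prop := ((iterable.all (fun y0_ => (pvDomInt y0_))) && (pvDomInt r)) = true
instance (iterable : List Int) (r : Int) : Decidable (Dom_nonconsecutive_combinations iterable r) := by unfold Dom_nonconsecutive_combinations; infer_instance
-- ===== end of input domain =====

-- B replaces A's generate-all-then-filter (itertools.combinations + adjacency test)
-- by a pruned DFS that never extends a pick with a value equal to the previous pick + 1
-- (objective: alternative, output-sensitive pruning).

-- ===== PORT A =====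
-- itertools.combinations of a list, in itertools' lexicographic-by-position order
def pvCombos (xs : List Int) (k : Nat) : List (List Int) :=
  match k, xs with
  | 0, _ => [[]]
  | _ + 1, [] => []
  | k + 1, x :: rest => (pvCombos rest k).map (fun c => x :: c) ++ pvCombos rest (k + 1)

-- A's filter: all(combination[i+1] - combination[i] != 1 for i in range(len(combination)-1))
def pvAdjOk (c : List Int) : Bool :=
  (List.range (c.length - 1)).all (fun i => decide (c.getD (i + 1) 0 - c.getD i 0 ≠ 1))

def nonconsecutive_combinations (iterable : List Int) (r : Int) : List (List Int) :=
  if iterable = [] then []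
  else if r = 1 then iterable.map (fun x => [x])
  else (pvCombos iterable r.toNat).filter pvAdjOk

-- ===== PORT B =====
-- `prev is None or v - prev != 1`
def pvCondB (prev : Option Int) (x : Int) : Bool :=
  match prev with
  | none => true
  | some p => decide (x - p ≠ 1)

-- the recursive generator dfs(start, prev, k), with the positional loop over
-- iterable[start:] rendered as structural recursion on the remaining list
def pvDFS (xs : List Int) (prev : Option Int) (k : Int) : List (List Int) :=
  if k = 0 then [[]]
  else
    match xs with
    | [] => []
    | x :: rest =>
      (if pvCondB prev x then (pvDFS rest (some x) (k - 1)).map (fun c => x :: c) else [])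
        ++ pvDFS rest prev k

def nonconsecutive_combinations_alt (iterable : List Int) (r : Int) : List (List Int) :=
  if iterable = [] then [] else pvDFS iterable none r

-- ===== PRECONDITION & SPEC =====
-- A raises ValueError ('r must be non-negative') when the iterable is nonempty and r < 0.
def Pre_nonconsecutive_combinations (iterable : List Int) (r : Int) : Prop :=
  iterable = [] ∨ 0 ≤ r
instance (iterable : List Int) (r : Int) : Decidable (Pre_nonconsecutive_combinations iterable r) := by unfold Pre_nonconsecutive_combinations; infer_instance
def pvWitness_nonconsecutive_combinations : List Int × Int := ([1, 2, 4], 2)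

def Spec_nonconsecutive_combinations (iterable : List Int) (r : Int) (out : List (List Int)) : Prop := out = nonconsecutive_combinations_alt iterable r
instance (iterable : List Int) (r : Int) (out : List (List Int)) : Decidable (Spec_nonconsecutive_combinations iterable r out) := by unfold Spec_nonconsecutive_combinations; infer_instance

-- ===== CLAIM (what is proved, stated in full; the proofs are below) =====
def Claim_equal_nonconsecutive_combinations : Prop := ∀ (iterable : List Int) (r : Int), Dom_nonconsecutive_combinations iterable r → Pre_nonconsecutive_combinations iterable r → Spec_nonconsecutive_combinations iterable r (nonconsecutive_combinations iterable r)

-- ===== LEMMAS AND PROOFS =====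

-- chain form of A's adjacency test, threaded the way the DFS threads `prev`
def pvOkChain (prev : Option Int) : List Int → Bool
  | [] => true
  | x :: rest => pvCondB prev x && pvOkChain (some x) rest

theorem pvAdjOk_cons_cons (a b : Int) (t : List Int) :
    pvAdjOk (a :: b :: t) = ((decide (b - a ≠ 1)) && pvAdjOk (b :: t)) := by
  simp only [pvAdjOk, List.range_succ_eq_map, List.all_map, Function.comp_def,
    List.length_cons, Nat.add_sub_cancel, List.all_cons]
  rfl

theorem okChain_none_eq_adjOk : ∀ c : List Int, pvOkChain none c = pvAdjOk c := by
  intro c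
  induction c with
  | nil => simp [pvOkChain, pvAdjOk]
  | cons a t ih =>
    cases t with
    | nil => simp [pvOkChain, pvCondB, pvAdjOk]
    | cons b t' =>
      rw [pvAdjOk_cons_cons, ← ih]
      simp [pvOkChain, pvCondB]

theorem filter_okChain_map (prev : Option Int) (x : Int) (L : List (List Int)) :
    (L.map (fun c => x :: c)).filter (pvOkChain prev) =
      if pvCondB prev x then (L.filter (pvOkChain (some x))).map (fun c => x :: c) else [] := by
  induction L with
  | nil => simp
  | cons c L ih =>
    by_cases h : pvCondB prev x
    · simp_all [pvOkChain, List.filter_cons]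
      split_ifs <;> simp
    · simp_all [pvOkChain]

theorem dfs_eq_filter :
    ∀ (xs : List Int) (n : Nat) (prev : Option Int),
      pvDFS xs prev (n : Int) = (pvCombos xs n).filter (pvOkChain prev) := by
  intro xs
  induction xs with
  | nil =>
    intro n prev
    cases n with
    | zero => simp [pvDFS, pvCombos, pvOkChain]
    | succ m => simp [pvDFS, pvCombos]; omega
  | cons x rest ih =>
    intro n prev
    cases n with
    | zero => simp [pvDFS, pvCombos, pvOkChain]
    | succ m =>
      have hne : ((m + 1 : Nat) : Int) ≠ 0 := by omega
      have hsub : ((m + 1 : Nat) : Int) - 1 = (m : Int) := by omega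
      rw [pvDFS, if_neg hne]
      simp only [hsub, ih, pvCombos, List.filter_append, filter_okChain_map]

theorem pvDFS_zero (xs : List Int) (prev : Option Int) : pvDFS xs prev 0 = [[]] := by
  cases xs <;> rw [pvDFS] <;> simp

theorem dfs_one (xs : List Int) : pvDFS xs none 1 = xs.map (fun x => [x]) := by
  induction xs with
  | nil => simp [pvDFS]
  | cons x rest ih =>
    rw [pvDFS]
    simp [pvCondB, pvDFS_zero, ih]

-- ===== VERDICT (by name: the statement is the Claim_ definition above) =====
theorem nonconsecutive_combinations_spec : Claim_equal_nonconsecutive_combinations := by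
  intro iterable r _ hPre
  unfold Spec_nonconsecutive_combinations nonconsecutive_combinations nonconsecutive_combinations_alt
  by_cases hempty : iterable = []
  · simp [hempty]
  · have hr : 0 ≤ r := hPre.resolve_left hempty
    rw [if_neg hempty, if_neg hempty]
    by_cases h1 : r = 1
    · subst h1
      rw [if_pos rfl]
      have : (1 : Int) = ((1 : Nat) : Int) := rfl
      rw [← dfs_one iterable]
    · rw [if_neg h1]
      have hcast : r = ((r.toNat : Nat) : Int) := (Int.toNat_of_nonneg hr).symm
      rw [hcast, dfs_eq_filter]
      exact (List.filter_congr (fun c _ => okChain_none_eq_adjOk c)).symm
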